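-- pv_equiv track=rewrite | github.com/GNOME/orca | src/orca/backends/gsettings_backend.py | __dashToCamel
-- ===== SOURCE A (Python) =====
-- def __dashToCamel(stringAsDasherized):
--     if stringAsDasherized is None:
--         return None
--
--     myList = stringAsDasherized.split('-')
--     outString = myList.pop(0)
--
--     for word in myList:
--         outString += word.capitalize()
--
--     return outString
-- ===== SOURCE B (Python) =====
-- def __dashToCamel(stringAsDasherized):
--     if stringAsDasherized is None:
--         return None
--
--     out = []
--     state = 0  # 0: before any dash, 1: at start of a word, 2: inside a word
--     for ch in stringAsDasherized:
--         if ch == '-':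
--             state = 1
--         elif state == 0:
--             out.append(ch)
--         elif state == 1:
--             out.append(ch.upper())
--             state = 2
--         else:
--             out.append(ch.lower())
--     return ''.join(out)
-- ===== Notes on version B (the rewrite author's own statement) =====
-- stated objective: alternative
-- what changed: Replaces split('-') + word-list loop with a single character-scan state machine that uppercases the first letter after each dash and lowercases the rest of each word in one pass, building no intermediate word list.
import Mathlib
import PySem

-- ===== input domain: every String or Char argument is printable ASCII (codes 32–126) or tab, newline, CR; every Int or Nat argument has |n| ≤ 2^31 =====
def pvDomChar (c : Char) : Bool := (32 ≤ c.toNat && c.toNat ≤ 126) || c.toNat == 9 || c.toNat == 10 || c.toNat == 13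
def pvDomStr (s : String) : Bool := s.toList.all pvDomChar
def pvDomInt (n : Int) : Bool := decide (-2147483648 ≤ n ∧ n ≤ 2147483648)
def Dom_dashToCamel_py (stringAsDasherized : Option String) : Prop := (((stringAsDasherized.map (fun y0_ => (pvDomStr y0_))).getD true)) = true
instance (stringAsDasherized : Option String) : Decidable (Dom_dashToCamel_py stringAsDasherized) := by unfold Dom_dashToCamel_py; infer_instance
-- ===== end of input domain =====

-- B replaces the split-then-loop accumulation with a single-pass state machine; return value only, no mutation.

-- ===== PORT A =====
-- str.capitalize() on ASCII: first char uppercased, rest lowercased (exact on the ASCII domain)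
def capChars (w : List Char) : List Char :=
  match w with
  | [] => []
  | c :: rest => PySem.Chars.upperChar c :: PySem.Chars.lower rest

def dashToCamel_py (stringAsDasherized : Option String) : Option String :=
  match stringAsDasherized with
  | none => none
  | some s =>
    match PySem.Chars.splitOn s.toList ['-'] with
    | [] => none  -- unreachable: splitOn with a nonempty separator never returns []
    | w :: rest =>
      some (String.ofList (rest.foldl (fun acc word => acc ++ capChars word) w))

-- ===== PORT B =====
-- the loop of Source B: state 0 = before any dash, 1 = at start of a word, 2 = inside a word
def camelGo (cs : List Char) (state : Nat) : List Char :=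
  match cs with
  | [] => []
  | c :: rest =>
    if c = '-' then camelGo rest 1
    else if state = 0 then c :: camelGo rest 0
    else if state = 1 then PySem.Chars.upperChar c :: camelGo rest 2
    else PySem.Chars.lowerChar c :: camelGo rest state

def dashToCamel_py_alt (stringAsDasherized : Option String) : Option String :=
  match stringAsDasherized with
  | none => none
  | some s => some (String.ofList (camelGo s.toList 0))

-- ===== PRECONDITION & SPEC =====
def Spec_dashToCamel_py (stringAsDasherized : Option String) (out : Option String) : Prop := out = dashToCamel_py_alt stringAsDasherized
instance (stringAsDasherized : Option String) (out : Option String) : Decidable (Spec_dashToCamel_py stringAsDasherized out) := by unfold Spec_dashToCamel_py; infer_instance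

-- ===== CLAIM (what is proved, stated in full; the proofs are below) =====
def Claim_equal_dashToCamel_py : Prop := ∀ (stringAsDasherized : Option String), Dom_dashToCamel_py stringAsDasherized → Spec_dashToCamel_py stringAsDasherized (dashToCamel_py stringAsDasherized)

-- ===== LEMMAS AND PROOFS =====

-- reference splitter for sep = "-": (first word, remaining words)
def mySplit (cs : List Char) : List Char × List (List Char) :=
  match cs with
  | [] => ([], [])
  | c :: rest =>
    if c = '-' then ([], (mySplit rest).1 :: (mySplit rest).2)
    else (c :: (mySplit rest).1, (mySplit rest).2)

theorem splitOn_go_eq (fuel : Nat) (l cur : List Char) (acc : List (List Char))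
    (h : l.length ≤ fuel) :
    PySem.Chars.splitOn.go ['-'] fuel l cur acc
      = acc.reverse ++ (cur.reverse ++ (mySplit l).1) :: (mySplit l).2 := by
  induction fuel generalizing l cur acc with
  | zero =>
    have : l = [] := List.length_eq_zero_iff.mp (Nat.le_zero.mp h)
    subst this
    simp [PySem.Chars.splitOn.go, mySplit]
  | succ n ih =>
    cases l with
    | nil => simp [PySem.Chars.splitOn.go, mySplit]
    | cons c rest =>
      by_cases hc : c = '-'
      · subst hc
        have hp : List.isPrefixOf ['-'] ('-' :: rest) = true := by
          simp [List.isPrefixOf]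
        rw [PySem.Chars.splitOn.go]
        simp only [hp, if_pos]
        simp only [show (['-'] : List Char).length = 1 from rfl, List.drop_one, List.tail_cons]
        rw [ih rest [] (List.reverse cur :: acc) (by simpa using Nat.lt_succ_iff.mp (by simpa using h))]
        simp [mySplit]
      · have hp : List.isPrefixOf ['-'] (c :: rest) = false := by
          simp only [List.isPrefixOf]
          simp
          exact fun h => hc h.symm
        rw [PySem.Chars.splitOn.go]
        simp only [hp]
        rw [if_neg (by simp)]
        rw [ih rest (c :: cur) acc (by simpa using Nat.lt_succ_iff.mp (by simpa using h))]
        simp [mySplit, hc]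

theorem splitOn_eq_mySplit (cs : List Char) :
    PySem.Chars.splitOn cs ['-'] = (mySplit cs).1 :: (mySplit cs).2 := by
  unfold PySem.Chars.splitOn
  rw [splitOn_go_eq (cs.length + 1) cs [] [] (Nat.le_succ _)]
  simp

theorem foldl_cap (ws : List (List Char)) (w : List Char) :
    ws.foldl (fun acc word => acc ++ capChars word) w = w ++ (ws.map capChars).flatten := by
  induction ws generalizing w with
  | nil => simp
  | cons x xs ih => simp [ih, List.append_assoc]

theorem camelGo_eq (cs : List Char) :
    camelGo cs 0 = (mySplit cs).1 ++ ((mySplit cs).2.map capChars).flatten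
    ∧ camelGo cs 1 = (((mySplit cs).1 :: (mySplit cs).2).map capChars).flatten
    ∧ camelGo cs 2 = PySem.Chars.lower (mySplit cs).1 ++ ((mySplit cs).2.map capChars).flatten := by
  induction cs with
  | nil => simp [camelGo, mySplit, PySem.Chars.lower, capChars]
  | cons c rest ih =>
    obtain ⟨h0, h1, h2⟩ := ih
    by_cases hc : c = '-'
    · subst hc
      simp [camelGo, mySplit, h1, capChars, PySem.Chars.lower]
    · simp [camelGo, mySplit, hc, h0, h2, capChars, PySem.Chars.lower]

-- ===== VERDICT (by name: the statement is the Claim_ definition above) =====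
theorem dashToCamel_py_spec : Claim_equal_dashToCamel_py := by
  intro s _
  unfold Spec_dashToCamel_py
  cases s with
  | none => rfl
  | some s =>
    simp only [dashToCamel_py, dashToCamel_py_alt, splitOn_eq_mySplit]
    rw [foldl_cap, (camelGo_eq s.toList).1]
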